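-- pv_equiv track=rewrite | github.com/Quentin18/advent-of-code | 2025/day02/part2.py | is_valid_id
-- ===== SOURCE A (Python) =====
-- def is_valid_id(id_: int) -> bool:
--     id_str = str(id_)
--     id_length = len(id_str)
--
--     for i in range(1, id_length // 2 + 1):
--         if id_length % i != 0:
--             continue
--
--         if id_str.count(id_str[:i]) == id_length // i:
--             return False
--
--     return True
-- ===== SOURCE B (Python) =====
-- def is_valid_id(id_: int) -> bool:
--     s = str(id_)
--     return s not in (s + s)[1:-1]
-- ===== Notes on version B (the rewrite author's own statement) =====
-- stated objective: idiomatic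
-- what changed: Replaces the loop over prefix-length divisors with the classic doubled-string repetition test: s is a concatenation of copies of a proper prefix iff s occurs inside (s+s)[1:-1], so the whole check is one substring-membership test.
import Mathlib
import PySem

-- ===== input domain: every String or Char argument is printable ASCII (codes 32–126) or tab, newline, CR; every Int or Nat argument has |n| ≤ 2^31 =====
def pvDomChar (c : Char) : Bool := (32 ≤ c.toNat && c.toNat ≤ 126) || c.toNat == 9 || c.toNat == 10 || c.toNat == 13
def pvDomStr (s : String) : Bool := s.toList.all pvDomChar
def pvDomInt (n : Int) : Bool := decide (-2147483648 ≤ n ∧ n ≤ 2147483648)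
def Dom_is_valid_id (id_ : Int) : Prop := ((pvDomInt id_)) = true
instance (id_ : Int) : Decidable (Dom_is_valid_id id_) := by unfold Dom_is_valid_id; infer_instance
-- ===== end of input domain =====

-- B replaces A's loop over prefix-length divisors by the classic doubled-string repetition
-- test `s not in (s+s)[1:-1]` (idiomatic; one substring-membership test, no divisor loop).

-- ===== PORT A =====
def is_valid_id (id_ : Int) : Bool :=
  let idStr := PySem.Int.toChars id_
  let idLength : Int := (idStr.length : Int)
  (PySem.List.pyRange 1 (PySem.Int.floordiv idLength 2 + 1) 1).foldl
    (fun ok i =>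
      if PySem.Int.mod idLength i != 0 then ok
      else if ((PySem.Chars.count idStr (PySem.List.slice idStr none (some i)) : Int)
                == PySem.Int.floordiv idLength i) then false
      else ok) true

-- ===== PORT B =====
def is_valid_id_alt (id_ : Int) : Bool :=
  let s := PySem.Int.toChars id_
  !(PySem.Chars.isIn s (PySem.List.slice (s ++ s) (some 1) (some (-1))))

-- ===== PRECONDITION & SPEC =====
def Spec_is_valid_id (id_ : Int) (out : Bool) : Prop := out = is_valid_id_alt id_
instance (id_ : Int) (out : Bool) : Decidable (Spec_is_valid_id id_ out) := by unfold Spec_is_valid_id; infer_instance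

-- ===== CLAIM (what is proved, stated in full; the proofs are below) =====
def Claim_equal_is_valid_id : Prop := ∀ (id_ : Int), Dom_is_valid_id id_ → Spec_is_valid_id id_ (is_valid_id id_)

-- ===== LEMMAS AND PROOFS =====

/-- `powL p k` = Python's `p * k` on strings: `k` copies of `p`. -/
def powL (p : List Char) (k : Nat) : List Char := (List.replicate k p).flatten

theorem powL_succ (p : List Char) (k : Nat) : powL p (k+1) = p ++ powL p k := by
  simp only [powL, List.replicate_succ, List.flatten_cons]

theorem powL_one (p : List Char) : powL p 1 = p := by simp [powL]

theorem powL_add (p : List Char) (a b : Nat) : powL p (a+b) = powL p a ++ powL p b := by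
  simp only [powL, List.replicate_add, List.flatten_append]

theorem powL_length (p : List Char) (k : Nat) : (powL p k).length = k * p.length := by
  simp [powL]

theorem powL_nil (k : Nat) : powL [] k = [] := by simp [powL]

/-- "s is a concatenation of >= 2 copies of a proper prefix" (what A's divisor loop detects). -/
def PPow (s : List Char) : Prop :=
  ∃ d : Nat, 1 ≤ d ∧ d < s.length ∧ d ∣ s.length ∧ s = powL (s.take d) (s.length / d)

/-- "s equals a nontrivial rotation of itself" (what B's doubled-string test detects). -/
def QRot (s : List Char) : Prop :=
  ∃ j : Nat, 1 ≤ j ∧ j < s.length ∧ s.drop j ++ s.take j = s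

theorem go_nil (sub : List Char) (fuel acc : Nat) :
    PySem.Chars.count.go sub fuel [] acc = acc := by
  cases fuel <;> simp [PySem.Chars.count.go]

theorem go_cons (sub l : List Char) (c : Char) (fuel acc : Nat) :
    PySem.Chars.count.go sub (fuel+1) (c :: l) acc =
      if sub.isPrefixOf (c :: l) then
        PySem.Chars.count.go sub fuel (List.drop sub.length (c :: l)) (acc + 1)
      else PySem.Chars.count.go sub fuel l acc := by
  simp [PySem.Chars.count.go]

/-- Greedy non-overlapping count: result bound and exact-tiling characterisation. -/
theorem go_spec (sub : List Char) (hsub : sub ≠ []) :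
    ∀ (fuel : Nat) (l : List Char) (acc : Nat), l.length ≤ fuel →
      ∃ k, PySem.Chars.count.go sub fuel l acc = acc + k ∧ k * sub.length ≤ l.length ∧
        (k * sub.length = l.length → l = powL sub k) := by
  have hm : 1 ≤ sub.length := List.length_pos_iff.mpr hsub
  intro fuel
  induction fuel with
  | zero =>
      intro l acc hl
      have : l = [] := by
        cases l with
        | nil => rfl
        | cons c t => simp at hl
      subst this
      exact ⟨0, by simp [go_nil, powL]⟩
  | succ fuel ih =>
      intro l acc hl
      cases l with
      | nil => exact ⟨0, by simp [go_nil, powL]⟩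
      | cons c t =>
          rw [go_cons]
          by_cases hp : sub.isPrefixOf (c :: t)
          · rw [if_pos hp]
            have hpre : sub <+: (c :: t) := List.isPrefixOf_iff_prefix.mp hp
            have hlen_le : sub.length ≤ (c :: t).length := hpre.length_le
            have hdl : (List.drop sub.length (c :: t)).length
                = (c :: t).length - sub.length := by simp
            have hfuel : (List.drop sub.length (c :: t)).length ≤ fuel := by
              simp only [hdl]
              simp only [List.length_cons] at hl hlen_le ⊢
              omega
            obtain ⟨k, hk, hb, ht⟩ := ih (List.drop sub.length (c :: t)) (acc + 1) hfuel
            refine ⟨k + 1, by rw [hk]; omega, ?_, ?_⟩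
            · have : (k+1) * sub.length = k * sub.length + sub.length := by ring
              rw [hdl] at hb
              omega
            · intro htile
              have hkm : k * sub.length = (List.drop sub.length (c :: t)).length := by
                rw [hdl]
                have : (k+1) * sub.length = k * sub.length + sub.length := by ring
                omega
              have hdrop := ht hkm
              have htake : List.take sub.length (c :: t) = sub :=
                (List.prefix_iff_eq_take.mp hpre).symm
              calc (c : Char) :: t
                  = List.take sub.length (c :: t) ++ List.drop sub.length (c :: t) := by
                    rw [List.take_append_drop]
                _ = sub ++ powL sub k := by rw [htake, hdrop]
                _ = powL sub (k+1) := (powL_succ sub k).symm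
          · rw [if_neg hp]
            have hfuel : t.length ≤ fuel := by
              simp only [List.length_cons] at hl; omega
            obtain ⟨k, hk, hb, _⟩ := ih t acc hfuel
            refine ⟨k, hk, ?_, ?_⟩
            · simp only [List.length_cons]; omega
            · intro htile
              exfalso
              simp only [List.length_cons] at htile
              omega

/-- Greedy non-overlapping count is exact on powers. -/
theorem go_pow (sub : List Char) (hsub : sub ≠ []) :
    ∀ (k fuel acc : Nat), (powL sub k).length ≤ fuel →
      PySem.Chars.count.go sub fuel (powL sub k) acc = acc + k := by
  have hm : 1 ≤ sub.length := List.length_pos_iff.mpr hsub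
  intro k
  induction k with
  | zero => intro fuel acc _; simp [powL, go_nil]
  | succ k ih =>
      intro fuel acc hfuel
      have hlen : (powL sub (k+1)).length = (k+1) * sub.length := powL_length sub (k+1)
      obtain ⟨c, s', hcs⟩ : ∃ c s', sub = c :: s' := by
        cases sub with
        | nil => exact absurd rfl hsub
        | cons c s' => exact ⟨c, s', rfl⟩
      have hexp : powL sub (k+1) = sub ++ powL sub k := powL_succ sub k
      obtain ⟨f, rfl⟩ : ∃ f, fuel = f + 1 := by
        refine ⟨fuel - 1, ?_⟩
        have h1 : 0 < (k+1) * sub.length := Nat.mul_pos (by omega) (by omega)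
        omega
      have hcons : powL sub (k+1) = c :: (s' ++ powL sub k) := by
        rw [hexp, hcs]; simp
      rw [hcons, go_cons]
      have hsubapp : c :: (s' ++ powL sub k) = sub ++ powL sub k := by rw [hcs]; simp
      have hpre : sub.isPrefixOf (c :: (s' ++ powL sub k)) := by
        rw [List.isPrefixOf_iff_prefix, hsubapp]
        exact List.prefix_append sub (powL sub k)
      rw [if_pos hpre]
      have hdrop : List.drop sub.length (c :: (s' ++ powL sub k)) = powL sub k := by
        rw [hsubapp, List.drop_left]
      rw [hdrop]
      have hfk : (powL sub k).length ≤ f := by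
        rw [powL_length] at hfuel ⊢
        have : (k+1) * sub.length = k * sub.length + sub.length := by ring
        omega
      rw [ih f (acc + 1) hfk]
      omega

theorem count_eq_iff (s : List Char) (d : Nat) (h1 : 1 ≤ d) (hdn : d ≤ s.length) :
    (PySem.Chars.count s (s.take d) = s.length / d ∧ d ∣ s.length) ↔
      (s = powL (s.take d) (s.length / d) ∧ d ∣ s.length) := by
  have hlt : (s.take d).length = d := by simp [hdn]
  have hsub : s.take d ≠ [] := by
    intro h; rw [h] at hlt; simp at hlt; omega
  have hcount : PySem.Chars.count s (s.take d)
      = PySem.Chars.count.go (s.take d) s.length s 0 := by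
    have : (s.take d).isEmpty = false := List.isEmpty_eq_false_iff.mpr hsub
    simp [PySem.Chars.count, this]
  constructor
  · rintro ⟨hc, hdvd⟩
    refine ⟨?_, hdvd⟩
    obtain ⟨k, hk, hb, ht⟩ := go_spec (s.take d) hsub s.length s 0 (le_refl _)
    rw [hcount, hk] at hc
    have hkval : k = s.length / d := by omega
    subst hkval
    apply ht
    rw [hlt]
    exact Nat.div_mul_cancel hdvd
  · rintro ⟨hs, hdvd⟩
    refine ⟨?_, hdvd⟩
    rw [hcount]
    conv_lhs => rw [show PySem.Chars.count.go (s.take d) s.length s 0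
      = PySem.Chars.count.go (s.take d) s.length (powL (s.take d) (s.length / d)) 0 by rw [← hs]]
    rw [go_pow (s.take d) hsub (s.length / d) s.length 0
      (by rw [powL_length, hlt, Nat.div_mul_cancel hdvd])]
    omega

/-- Lyndon–Schützenberger: commuting lists are powers of a common list. -/
theorem comm_powL (p t : List Char) (h : p ++ t = t ++ p) :
    ∃ (r : List Char) (a b : Nat), p = powL r a ∧ t = powL r b := by
  generalize hn : p.length + t.length = n
  induction n using Nat.strong_induction_on generalizing p t with
  | _ n ih =>
    by_cases hp : p = []
    · exact ⟨t, 0, 1, by simp [hp, powL], (powL_one t).symm⟩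
    by_cases ht : t = []
    · exact ⟨p, 1, 0, (powL_one p).symm, by simp [ht, powL]⟩
    have hplen : 1 ≤ p.length := by have := List.length_pos_iff.mpr hp; omega
    have htlen : 1 ≤ t.length := by have := List.length_pos_iff.mpr ht; omega
    rcases Nat.le_total p.length t.length with hle | hle
    · -- p is a prefix of t
      have htake : List.take p.length t = p := by
        have h1 : List.take p.length (p ++ t) = p := List.take_left
        have h2 : List.take p.length (t ++ p) = List.take p.length t :=
          List.take_append_of_le_length hle
        rw [h] at h1; rw [h2] at h1; exact h1
      set u := List.drop p.length t with hu
      have htu : t = p ++ u := by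
        conv_lhs => rw [← List.take_append_drop p.length t]
        rw [htake, hu]
      have hcomm : p ++ u = u ++ p := by
        have hx : p ++ (p ++ u) = (p ++ u) ++ p := by rw [← htu]; exact h
        rw [List.append_assoc] at hx
        exact List.append_cancel_left hx
      have hmeas : p.length + u.length < n := by
        have hul : u.length = t.length - p.length := by rw [hu]; simp
        omega
      obtain ⟨r, a, b, hpr, hur⟩ := ih (p.length + u.length) hmeas p u hcomm rfl
      exact ⟨r, a, a + b, hpr, by rw [htu, hpr, hur, ← powL_add]⟩
    · -- t is a prefix of p
      have htake : List.take t.length p = t := by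
        have h1 : List.take t.length (t ++ p) = t := List.take_left
        have h2 : List.take t.length (p ++ t) = List.take t.length p :=
          List.take_append_of_le_length hle
        rw [← h] at h1; rw [h2] at h1; exact h1
      set u := List.drop t.length p with hu
      have hpu : p = t ++ u := by
        conv_lhs => rw [← List.take_append_drop t.length p]
        rw [htake, hu]
      have hcomm : t ++ u = u ++ t := by
        have hx : t ++ (t ++ u) = (t ++ u) ++ t := by rw [← hpu]; exact h.symm
        rw [List.append_assoc] at hx
        exact List.append_cancel_left hx
      have hmeas : t.length + u.length < n := by
        have hul : u.length = p.length - t.length := by rw [hu]; simp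
        omega
      obtain ⟨r, a, b, htr, hur⟩ := ih (t.length + u.length) hmeas t u hcomm rfl
      exact ⟨r, a + b, a, by rw [hpu, htr, hur, ← powL_add], htr⟩

theorem QRot_iff_PPow (s : List Char) : QRot s ↔ PPow s := by
  constructor
  · rintro ⟨j, h1, hj, hrot⟩
    set p := List.take j s with hp
    set t := List.drop j s with htd
    have hplen : p.length = j := by rw [hp]; simp; omega
    have htlen : t.length = s.length - j := by rw [htd]; simp
    have hst : s = p ++ t := by rw [hp, htd]; simp
    have hcomm : p ++ t = t ++ p := by rw [← hst]; exact hrot.symm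
    obtain ⟨r, a, b, hpr, htr⟩ := comm_powL p t hcomm
    have hrne : r ≠ [] := by
      intro hr; rw [hr, powL_nil] at hpr
      have : p.length = 0 := by rw [hpr]; simp
      omega
    have hrlen : 1 ≤ r.length := by
      have := List.length_pos_iff.mpr hrne; omega
    have ha : 1 ≤ a := by
      by_contra hcon
      have ha0 : a = 0 := by omega
      rw [ha0] at hpr
      have : p.length = 0 := by rw [hpr]; simp [powL]
      omega
    have hb : 1 ≤ b := by
      by_contra hcon
      have hb0 : b = 0 := by omega
      rw [hb0] at htr
      have : t.length = 0 := by rw [htr]; simp [powL]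
      omega
    have hspow : s = powL r (a + b) := by rw [hst, hpr, htr, powL_add]
    have hslen : s.length = (a + b) * r.length := by rw [hspow, powL_length]
    have hsplit : powL r (a + b) = r ++ powL r (a + b - 1) := by
      conv_lhs => rw [show a + b = 1 + (a + b - 1) from by omega]
      rw [powL_add, powL_one]
    refine ⟨r.length, hrlen, ?_, ⟨a + b, by rw [hslen, Nat.mul_comm]⟩, ?_⟩
    · have h2 : 2 * r.length ≤ (a + b) * r.length := by
        apply Nat.mul_le_mul_right; omega
      omega
    · have htake : List.take r.length s = r := by
        rw [hspow, hsplit, List.take_left]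
      have hdiv : s.length / r.length = a + b := by
        rw [hslen, Nat.mul_div_cancel _ (by omega)]
      rw [htake, hdiv]; exact hspow
  · rintro ⟨d, h1, hdn, hdvd, hs⟩
    set p := List.take d s with hp
    have hplen : p.length = d := by rw [hp]; simp; omega
    obtain ⟨k, hk⟩ := hdvd
    have hkd : s.length / d = k := by rw [hk, Nat.mul_div_cancel_left _ (by omega)]
    have hk2 : 2 ≤ k := by
      by_contra hcon
      interval_cases k <;> omega
    refine ⟨d, h1, hdn, ?_⟩
    have hsplit : powL p k = p ++ powL p (k - 1) := by
      conv_lhs => rw [show k = 1 + (k - 1) from by omega]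
      rw [powL_add, powL_one]
    have hsplit' : powL p k = powL p (k - 1) ++ p := by
      conv_lhs => rw [show k = (k - 1) + 1 from by omega]
      rw [powL_add, powL_one]
    have hsp : s = p ++ powL p (k - 1) := by rw [hs, hkd, hsplit]
    have hdropd : List.drop d s = powL p (k - 1) := by
      conv_lhs => rw [hsp]
      rw [← hplen, List.drop_left]
    have htaked : List.take d s = p := rfl
    rw [hdropd, htaked, ← hsplit', hs, hkd]

theorem toDigitsCore_ne_nil (b : Nat) :
    ∀ (fuel n : Nat) (ds : List Char), ds ≠ [] → Nat.toDigitsCore b fuel n ds ≠ [] := by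
  intro fuel
  induction fuel with
  | zero => intro n ds hds; simpa [Nat.toDigitsCore] using hds
  | succ fuel ih =>
      intro n ds hds
      simp only [Nat.toDigitsCore]
      split
      · simp
      · exact ih _ _ (by simp)

theorem toChars_ne_nil (n : Int) : PySem.Int.toChars n ≠ [] := by
  unfold PySem.Int.toChars
  split
  · simp
  · unfold Nat.toDigits
    simp only [Nat.toDigitsCore]
    split
    · simp
    · exact toDigitsCore_ne_nil 10 _ _ _ (by simp)

theorem portB_iff (id_ : Int) : is_valid_id_alt id_ = true ↔ ¬ QRot (PySem.Int.toChars id_) := by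
  set s := PySem.Int.toChars id_ with hsdef
  have hne : s ≠ [] := toChars_ne_nil id_
  set n := s.length with hn
  have hn1 : 1 ≤ n := by have := List.length_pos_iff.mpr hne; omega
  have h2n : (s ++ s).length = 2 * n := by rw [List.length_append, ← hn]; ring
  have hcl1 : PySem.List.clampIdx (s ++ s).length 1 = 1 := by
    rw [h2n]; simp [PySem.List.clampIdx]; omega
  have hcl2 : PySem.List.clampIdx (s ++ s).length (-1) = 2 * n - 1 := by
    rw [PySem.List.clampIdx_neg_one, h2n]
  have hsl : PySem.List.slice (s ++ s) (some 1) (some (-1))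
      = List.take (2 * n - 1 - 1) (List.drop 1 (s ++ s)) := by
    simp only [PySem.List.slice, hcl1, hcl2]
  have htkgen : ∀ j : Nat, j ≤ n →
      List.take s.length (List.drop j s ++ s) = List.drop j s ++ List.take j s := by
    intro j hjle
    have hu : (List.drop j s).length = n - j := by rw [List.length_drop, ← hn]
    rw [List.take_append]
    congr 1
    · exact List.take_of_length_le (by omega)
    · congr 1
      omega
  have key : PySem.Chars.isIn s (PySem.List.slice (s ++ s) (some 1) (some (-1))) = true
      ↔ QRot s := by
    rw [← PySem.Chars.exists_prefix_drop_iff_isIn, hsl]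
    constructor
    · rintro ⟨j, hj⟩
      rw [List.drop_take, List.drop_drop] at hj
      obtain ⟨hpre, hlen⟩ := List.prefix_take_iff.mp hj
      have hjn : 1 + j ≤ n - 1 := by
        rw [← hn] at hlen; omega
      have hdropeq : List.drop (1 + j) (s ++ s) = List.drop (1 + j) s ++ s :=
        List.drop_append_of_le_length (by rw [← hn]; omega)
      rw [hdropeq] at hpre
      have heq := List.prefix_iff_eq_take.mp hpre
      rw [htkgen (1 + j) (by omega)] at heq
      exact ⟨1 + j, by omega, by rw [← hn]; omega, heq.symm⟩
    · rintro ⟨j, hj1, hjn, hrot⟩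
      rw [← hn] at hjn
      refine ⟨j - 1, ?_⟩
      rw [List.drop_take, List.drop_drop]
      rw [show 1 + (j - 1) = j from by omega]
      rw [List.prefix_take_iff]
      constructor
      · have hdropeq : List.drop j (s ++ s) = List.drop j s ++ s :=
          List.drop_append_of_le_length (by rw [← hn]; omega)
        rw [hdropeq, List.prefix_iff_eq_take, htkgen j (by omega)]
        exact hrot.symm
      · rw [← hn]; omega
  have hB : is_valid_id_alt id_
      = !(PySem.Chars.isIn s (PySem.List.slice (s ++ s) (some 1) (some (-1)))) := rfl
  rw [hB]
  calc (!(PySem.Chars.isIn s (PySem.List.slice (s ++ s) (some 1) (some (-1))))) = true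
      ↔ PySem.Chars.isIn s (PySem.List.slice (s ++ s) (some 1) (some (-1))) = false := by simp
    _ ↔ ¬ (PySem.Chars.isIn s (PySem.List.slice (s ++ s) (some 1) (some (-1))) = true) := by simp
    _ ↔ ¬ QRot s := not_congr key

theorem portA_iff (id_ : Int) : is_valid_id id_ = true ↔ ¬ PPow (PySem.Int.toChars id_) := by
  set s := PySem.Int.toChars id_ with hsdef
  have hne : s ≠ [] := toChars_ne_nil id_
  set n := s.length with hn
  have hn1 : 1 ≤ n := by have := List.length_pos_iff.mpr hne; omega
  have hfd2 : PySem.Int.floordiv (n : Int) 2 = ((n / 2 : Nat) : Int) := by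
    exact_mod_cast PySem.Int.floordiv_natCast n 2
  set q : Int → Bool := fun i =>
    (PySem.Int.mod (n : Int) i == 0) &&
      ((PySem.Chars.count s (PySem.List.slice s none (some i)) : Int)
        == PySem.Int.floordiv (n : Int) i) with hq
  have hstart : is_valid_id id_
      = (PySem.List.pyRange 1 (PySem.Int.floordiv (n : Int) 2 + 1) 1).foldl
          (fun ok i =>
            if PySem.Int.mod (n : Int) i != 0 then ok
            else if ((PySem.Chars.count s (PySem.List.slice s none (some i)) : Int)
                      == PySem.Int.floordiv (n : Int) i) then false
            else ok) true := rfl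
  have hfun : (fun (ok : Bool) (i : Int) =>
      if PySem.Int.mod (n : Int) i != 0 then ok
      else if ((PySem.Chars.count s (PySem.List.slice s none (some i)) : Int)
                == PySem.Int.floordiv (n : Int) i) then false
      else ok)
      = fun (ok : Bool) (i : Int) => if q i then false else ok := by
    funext ok i
    rw [hq]
    by_cases h1 : PySem.Int.mod (n : Int) i = 0 <;>
      by_cases h2 : ((PySem.Chars.count s (PySem.List.slice s none (some i)) : Int)
        = PySem.Int.floordiv (n : Int) i) <;>
      simp [h1, h2]
  have hfold : is_valid_id id_
      = !((PySem.List.pyRange 1 (PySem.Int.floordiv (n : Int) 2 + 1) 1).any q) := by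
    rw [hstart, hfun, PySem.List.foldl_if_false_eq]
    simp
  have hany : (PySem.List.pyRange 1 (PySem.Int.floordiv (n : Int) 2 + 1) 1).any q = true
      ↔ ∃ d : Nat, 1 ≤ d ∧ d ≤ n / 2 ∧ d ∣ n ∧
          PySem.Chars.count s (List.take d s) = n / d := by
    rw [List.any_eq_true]
    constructor
    · rintro ⟨i, hmem, hqi⟩
      rw [PySem.List.mem_pyRange_one] at hmem
      obtain ⟨hi1, hi2⟩ := hmem
      rw [hfd2] at hi2
      have hi0 : 0 ≤ i := by omega
      set d := i.toNat with hd
      have hid : i = (d : Int) := by rw [hd]; omega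
      rw [hq, hid] at hqi
      simp only [Bool.and_eq_true, beq_iff_eq] at hqi
      obtain ⟨hmod, hcnt⟩ := hqi
      rw [PySem.Int.mod_natCast] at hmod
      rw [PySem.Int.floordiv_natCast, PySem.List.slice_to_natCast] at hcnt
      have hmod' : n % d = 0 := by exact_mod_cast hmod
      have hcnt' : PySem.Chars.count s (List.take d s) = n / d := by exact_mod_cast hcnt
      have hd2 : d ≤ n / 2 := by
        rw [hid] at hi2; omega
      exact ⟨d, by omega, hd2, Nat.dvd_of_mod_eq_zero hmod', hcnt'⟩
    · rintro ⟨d, hd1, hd2, hdvd, hcnt⟩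
      refine ⟨(d : Int), ?_, ?_⟩
      · rw [PySem.List.mem_pyRange_one, hfd2]
        omega
      · rw [hq]
        simp only [Bool.and_eq_true, beq_iff_eq]
        rw [PySem.Int.mod_natCast, PySem.Int.floordiv_natCast, PySem.List.slice_to_natCast]
        constructor
        · have hmd : n % d = 0 := by
            obtain ⟨k, hk⟩ := hdvd; rw [hk]; exact Nat.mul_mod_right d k
          exact_mod_cast hmd
        · exact_mod_cast hcnt
  have hexp : (∃ d : Nat, 1 ≤ d ∧ d ≤ n / 2 ∧ d ∣ n ∧
      PySem.Chars.count s (List.take d s) = n / d) ↔ PPow s := by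
    constructor
    · rintro ⟨d, hd1, hd2, hdvd, hcnt⟩
      have hdle : d ≤ s.length := le_trans hd2 (Nat.div_le_self n 2)
      have hps := (count_eq_iff s d hd1 hdle).mp ⟨hcnt, hdvd⟩
      refine ⟨d, hd1, ?_, hdvd, hps.1⟩
      show d < n
      omega
    · rintro ⟨d, hd1, hdn, hdvd, hs⟩
      have hdn' : d < n := hdn
      have hdvd' : d ∣ n := hdvd
      obtain ⟨k, hk⟩ := hdvd'
      have hk2 : 2 ≤ k := by
        by_contra hcon
        interval_cases k <;> omega
      have h2d : 2 * d ≤ n := by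
        calc 2 * d = d * 2 := by ring
        _ ≤ d * k := Nat.mul_le_mul_left d hk2
        _ = n := hk.symm
      have hcnt := (count_eq_iff s d hd1 (show d ≤ s.length from show d ≤ n from by omega)).mpr
        ⟨hs, hdvd⟩
      refine ⟨d, hd1, ?_, hdvd, hcnt.1⟩
      omega
  rw [hfold]
  calc (!((PySem.List.pyRange 1 (PySem.Int.floordiv (n : Int) 2 + 1) 1).any q)) = true
      ↔ (PySem.List.pyRange 1 (PySem.Int.floordiv (n : Int) 2 + 1) 1).any q = false := by simp
    _ ↔ ¬ ((PySem.List.pyRange 1 (PySem.Int.floordiv (n : Int) 2 + 1) 1).any q = true) := by simp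
    _ ↔ ¬ PPow s := not_congr (hany.trans hexp)

-- ===== VERDICT (by name: the statement is the Claim_ definition above) =====
theorem is_valid_id_spec : Claim_equal_is_valid_id := by
  intro id_ _
  unfold Spec_is_valid_id
  have hA := portA_iff id_
  have hB := portB_iff id_
  rw [QRot_iff_PPow] at hB
  cases hA' : is_valid_id id_ <;> cases hB' : is_valid_id_alt id_ <;> simp_all
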